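-- pv_equiv track=rewrite | github.com/Chemist1986/PogrPythonDZ3 | Task1.py | analyze_items
-- ===== SOURCE A (Python) =====
-- def analyze_items(friends_items):
--
--     friends = list(friends_items.keys())
--
--
--     items_sets = [set(items) for items in friends_items.values()]
--
--
--     common_items = set.intersection(*items_sets)
--
--
--     unique_items = set.union(*items_sets) - common_items
--
--
--     items_except_one = set()
--     friend_without_item = ""
--     for friend_index, items_set in enumerate(items_sets):
--         other_items_sets = items_sets[:friend_index] + items_sets[friend_index + 1:]
--         items_except_current = set.intersection(*other_items_sets)
--         items_except_one.update(items_except_current - items_set)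
--         if not items_except_current - items_set:
--             friend_without_item = friends[friend_index]
--
--     return common_items, unique_items, items_except_one, friend_without_item
-- ===== SOURCE B (Python) =====
-- def analyze_items(friends_items):
--     friends = list(friends_items.keys())
--     sets = [set(v) for v in friends_items.values()]
--     n = len(sets)
--     # prefix intersections: pref[i] = sets[0] & ... & sets[i]
--     pref = []
--     acc = None
--     for s in sets:
--         acc = s if acc is None else acc & s
--         pref.append(acc)
--     # suffix intersections: suf[i] = sets[i] & ... & sets[n-1]
--     suf = [None] * n
--     acc = None
--     for i in range(n - 1, -1, -1):
--         acc = sets[i] if acc is None else sets[i] & acc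
--         suf[i] = acc
--     common_items = pref[-1]
--     total = set()
--     for s in sets:
--         total |= s
--     unique_items = total - common_items
--     items_except_one = set()
--     friend_without_item = ""
--     for i in range(n):
--         if i == 0:
--             others = suf[1]
--         elif i == n - 1:
--             others = pref[n - 2]
--         else:
--             others = pref[i - 1] & suf[i + 1]
--         missing = others - sets[i]
--         items_except_one |= missing
--         if not missing:
--             friend_without_item = friends[i]
--     return common_items, unique_items, items_except_one, friend_without_item
-- ===== Notes on version B (the rewrite author's own statement) =====
-- stated objective: faster
-- what changed: Replaces the per-friend re-intersection of all other sets (rebuilding and intersecting n-1 sets for each of the n friends) by prefix- and suffix-intersection arrays computed in one pass each, so every all-but-one intersection is a single intersection of two precomputed sets.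
import Mathlib
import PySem

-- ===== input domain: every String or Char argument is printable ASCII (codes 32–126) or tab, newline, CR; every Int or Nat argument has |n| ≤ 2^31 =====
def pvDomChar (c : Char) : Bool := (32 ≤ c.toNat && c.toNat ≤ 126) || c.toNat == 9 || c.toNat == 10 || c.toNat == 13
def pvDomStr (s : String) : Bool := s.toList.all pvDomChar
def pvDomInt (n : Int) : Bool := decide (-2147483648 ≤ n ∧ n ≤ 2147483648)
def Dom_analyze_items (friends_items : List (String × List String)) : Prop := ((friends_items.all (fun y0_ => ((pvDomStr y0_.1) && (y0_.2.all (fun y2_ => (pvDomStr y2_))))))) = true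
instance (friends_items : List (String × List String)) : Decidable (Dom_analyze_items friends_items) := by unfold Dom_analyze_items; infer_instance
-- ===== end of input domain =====

-- B replaces A's per-friend re-intersection of all other sets by one-pass prefix/suffix
-- intersection arrays (objective: faster, asymptotically).


-- ===== PORT A =====
-- set.intersection(*l) / set.union(*l); the [] case is Python's TypeError, excluded by Pre_.
def pvInterAll (l : List (PySem.Set String)) : PySem.Set String :=
  match l with
  | [] => []
  | h :: t => t.foldl PySem.Set.inter h

def pvUnionAll (l : List (PySem.Set String)) : PySem.Set String :=
  match l with
  | [] => []
  | h :: t => t.foldl PySem.Set.union h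

def analyze_items (friends_items : List (String × List String)) : List String × List String × List String × String :=
  let friends := friends_items.map (·.1)
  let items_sets := friends_items.map (fun p => PySem.Set.ofList p.2)
  let common_items := pvInterAll items_sets
  let unique_items := PySem.Set.diff (pvUnionAll items_sets) common_items
  let st := (PySem.List.enumerate items_sets 0).foldl
    (fun (st : PySem.Set String × String) p =>
      let other_items_sets := PySem.List.slice items_sets none (some p.1) ++
                              PySem.List.slice items_sets (some (p.1 + 1)) none
      let items_except_current := pvInterAll other_items_sets
      let st1 := PySem.Set.update st.1 (PySem.Set.diff items_except_current p.2)
      let st2 := if PySem.Set.diff items_except_current p.2 = [] then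
                   PySem.List.pyGetD friends p.1 "" else st.2
      (st1, st2)) ([], "")
  (common_items, unique_items, st.1, st.2)

-- ===== PORT B =====
-- pref = [s0, s0&s1, ...] built left to right (Source B's first loop).
def pvPrefGo (acc : PySem.Set String) : List (PySem.Set String) → List (PySem.Set String)
  | [] => [acc]
  | s :: r => acc :: pvPrefGo (PySem.Set.inter acc s) r

def pvPrefInters : List (PySem.Set String) → List (PySem.Set String)
  | [] => []
  | s :: r => pvPrefGo s r

-- suf[i] = sets[i] & suf[i+1] built right to left (Source B's second loop).
def pvSufInters : List (PySem.Set String) → List (PySem.Set String)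
  | [] => []
  | s :: r =>
    match pvSufInters r with
    | [] => [s]
    | a :: tl => PySem.Set.inter s a :: a :: tl

def analyze_items_alt (friends_items : List (String × List String)) : List String × List String × List String × String :=
  let friends := friends_items.map (·.1)
  let sets := friends_items.map (fun p => PySem.Set.ofList p.2)
  let n := PySem.List.len sets
  let pref := pvPrefInters sets
  let suf := pvSufInters sets
  let common_items := PySem.List.pyGetD pref (-1) []
  let total := sets.foldl PySem.Set.union []
  let unique_items := PySem.Set.diff total common_items
  let st := (PySem.List.pyRange 0 n 1).foldl
    (fun (st : PySem.Set String × String) i =>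
      let others := if i = 0 then PySem.List.pyGetD suf 1 []
                    else if i = n - 1 then PySem.List.pyGetD pref (n - 2) []
                    else PySem.Set.inter (PySem.List.pyGetD pref (i - 1) [])
                                         (PySem.List.pyGetD suf (i + 1) [])
      let missing := PySem.Set.diff others (PySem.List.pyGetD sets i [])
      (PySem.Set.update st.1 missing,
       if missing = [] then PySem.List.pyGetD friends i "" else st.2)) ([], "")
  (common_items, unique_items, st.1, st.2)

-- ===== PRECONDITION & SPEC =====
-- Pre_ excludes inputs with fewer than two friends, on which A raises TypeError
-- (set.intersection called with no arguments); keys are required distinct because the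
-- Python parameter is a dict, which cannot hold duplicate keys.
def Pre_analyze_items (friends_items : List (String × List String)) : Prop :=
  2 ≤ friends_items.length ∧ (friends_items.map (·.1)).Nodup
instance (friends_items : List (String × List String)) : Decidable (Pre_analyze_items friends_items) := by unfold Pre_analyze_items; infer_instance

def pvWitness_analyze_items : (List (String × List String)) :=
  [("ann", ["apple", "tea"]), ("bob", ["tea", "pen"])]

def Spec_analyze_items (friends_items : List (String × List String)) (out : List String × List String × List String × String) : Prop := out = analyze_items_alt friends_items
instance (friends_items : List (String × List String)) (out : List String × List String × List String × String) : Decidable (Spec_analyze_items friends_items out) := by unfold Spec_analyze_items; infer_instance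

-- ===== CLAIM (what is proved, stated in full; the proofs are below) =====
def Claim_equal_analyze_items : Prop := ∀ (friends_items : List (String × List String)), Dom_analyze_items friends_items → Pre_analyze_items friends_items → Spec_analyze_items friends_items (analyze_items friends_items)

-- ===== LEMMAS AND PROOFS =====

def pvNF (h : List String) (t : List (List String)) : List String :=
  h.filter (fun x => t.all (fun s => PySem.Set.contains s x))

theorem pvNF_nil (h : List String) : pvNF h [] = h := by
  simp [pvNF]

theorem pvNF_inter_left (acc s : List String) (l : List (List String)) :
    pvNF (PySem.Set.inter acc s) l = pvNF acc (s :: l) := by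
  simp only [pvNF, PySem.Set.inter, List.filter_filter, List.all_cons]
  apply List.filter_congr
  intro x _
  rw [Bool.and_comm]

theorem foldl_inter_eq (t : List (List String)) (h : List String) :
    t.foldl PySem.Set.inter h = pvNF h t := by
  induction t generalizing h with
  | nil => simp [pvNF_nil]
  | cons s r ih => simpa [pvNF_inter_left] using ih (PySem.Set.inter h s)

theorem inter_pvNF (h g : List String) (u w : List (List String)) :
    PySem.Set.inter (pvNF h u) (pvNF g w) = pvNF h (u ++ g :: w) := by
  simp only [PySem.Set.inter, pvNF, List.filter_filter]
  apply List.filter_congr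
  intro x _
  simp [PySem.Set.contains, List.decide_forall_mem, List.all_append, Bool.and_comm, Bool.and_left_comm]

theorem length_pvPrefGo (r : List (List String)) (acc : List String) :
    (pvPrefGo acc r).length = r.length + 1 := by
  induction r generalizing acc with
  | nil => rfl
  | cons s r ih => simp [pvPrefGo, ih]

theorem pvPrefGo_getElem? (r : List (List String)) (acc : List String) (k : Nat)
    (hk : k ≤ r.length) :
    (pvPrefGo acc r)[k]? = some (pvNF acc (r.take k)) := by
  induction r generalizing acc k with
  | nil =>
    have hk0 : k = 0 := by simpa using hk
    subst hk0
    simp [pvPrefGo, pvNF_nil]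
  | cons s r ih =>
    cases k with
    | zero => simp [pvPrefGo, pvNF_nil]
    | succ k =>
      rw [pvPrefGo]
      simpa [pvNF_inter_left] using ih (PySem.Set.inter acc s) k (by simpa using hk)

theorem pvSufInters_cons (h : List String) (t : List (List String)) :
    pvSufInters (h :: t) = pvNF h t :: pvSufInters t := by
  induction t generalizing h with
  | nil => simp [pvSufInters, pvNF_nil]
  | cons s r ih =>
    rw [pvSufInters, ih s]
    have hh : PySem.Set.inter h (pvNF s r) = pvNF h (s :: r) := by
      simp only [PySem.Set.inter, pvNF]
      apply List.filter_congr
      intro x _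
      simp [PySem.Set.contains, List.decide_forall_mem]
    simp [hh]

theorem length_pvSufInters (sets : List (List String)) :
    (pvSufInters sets).length = sets.length := by
  induction sets with
  | nil => rfl
  | cons h t ih => rw [pvSufInters_cons]; simp [ih]

theorem pvSufInters_getElem? (sets : List (List String)) (k : Nat) (hk : k < sets.length) :
    (pvSufInters sets)[k]? = some (pvNF (sets.getD k []) (sets.drop (k + 1))) := by
  induction sets generalizing k with
  | nil => simp at hk
  | cons h t ih =>
    rw [pvSufInters_cons]
    cases k with
    | zero => simp
    | succ k => simpa using ih k (by simpa using hk)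

theorem pvSufInters_getElem (sets : List (List String)) (k : Nat) (hk : k < sets.length)
    (hk2 : k < (pvSufInters sets).length) :
    (pvSufInters sets)[k] = pvNF (sets.getD k []) (sets.drop (k + 1)) := by
  have h2 := pvSufInters_getElem? sets k hk
  rw [List.getElem?_eq_getElem hk2] at h2
  exact Option.some.inj h2

theorem pvPrefGo_getElem (r : List (List String)) (acc : List String) (k : Nat)
    (hk : k ≤ r.length) (hk2 : k < (pvPrefGo acc r).length) :
    (pvPrefGo acc r)[k] = pvNF acc (r.take k) := by
  have h2 := pvPrefGo_getElem? r acc k hk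
  rw [List.getElem?_eq_getElem hk2] at h2
  exact Option.some.inj h2

theorem others_eq (s0 s1 : List String) (ss : List (List String)) (i : Int)
    (h0 : 0 ≤ i) (h1 : i < (PySem.List.len (s0 :: s1 :: ss))) :
    pvInterAll (PySem.List.slice (s0 :: s1 :: ss) none (some i) ++
                PySem.List.slice (s0 :: s1 :: ss) (some (i + 1)) none)
      = (if i = 0 then PySem.List.pyGetD (pvSufInters (s0 :: s1 :: ss)) 1 []
         else if i = PySem.List.len (s0 :: s1 :: ss) - 1 then
           PySem.List.pyGetD (pvPrefInters (s0 :: s1 :: ss)) (PySem.List.len (s0 :: s1 :: ss) - 2) []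
         else PySem.Set.inter (PySem.List.pyGetD (pvPrefInters (s0 :: s1 :: ss)) (i - 1) [])
                              (PySem.List.pyGetD (pvSufInters (s0 :: s1 :: ss)) (i + 1) [])) := by
  obtain ⟨k, rfl⟩ : ∃ k : Nat, i = (k : Int) := ⟨i.toNat, (Int.toNat_of_nonneg h0).symm⟩
  rw [PySem.List.len_eq] at h1
  have hk : k < ss.length + 2 := by simp at h1; omega
  have hcast : ((k : Int) + 1) = ((k + 1 : Nat) : Int) := by push_cast; ring
  rw [hcast, PySem.List.slice_to_natCast, PySem.List.slice_from_natCast]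
  have hlen : (PySem.List.len (s0 :: s1 :: ss)) = ((ss.length + 2 : Nat) : Int) := by
    rw [PySem.List.len_eq]; simp; omega
  have hsuflen : (pvSufInters (s0 :: s1 :: ss)).length = ss.length + 2 := by
    rw [length_pvSufInters]; simp
  have hpreflen : (pvPrefGo s0 (s1 :: ss)).length = ss.length + 2 := by
    rw [length_pvPrefGo]; simp
  split_ifs with hi0 hilast
  · -- i = 0
    have hk0 : k = 0 := by exact_mod_cast hi0
    subst hk0
    have h1lt : 1 < (pvSufInters (s0 :: s1 :: ss)).length := by omega
    have e1 : (1 : Int) = ((1 : Nat) : Int) := rfl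
    rw [e1, PySem.List.pyGetD_natCast, List.getD_eq_getElem _ _ (by omega),
      pvSufInters_getElem _ _ (by simp) h1lt]
    simp [pvInterAll, foldl_inter_eq]
  · -- i = n - 1
    have hklast : k = ss.length + 1 := by rw [hlen] at hilast; omega
    subst hklast
    have e2 : PySem.List.len (s0 :: s1 :: ss) - 2 = ((ss.length : Nat) : Int) := by
      rw [hlen]; push_cast; ring
    rw [e2, PySem.List.pyGetD_natCast, pvPrefInters,
      List.getD_eq_getElem _ _ (by omega),
      pvPrefGo_getElem _ _ _ (by simp) (by omega)]
    have e3 : List.take (ss.length + 1) (s0 :: s1 :: ss) = s0 :: List.take ss.length (s1 :: ss) :=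
      List.take_succ_cons
    have e4 : List.drop (ss.length + 1 + 1) (s0 :: s1 :: ss) = [] := by
      apply List.drop_eq_nil_of_le; simp
    rw [e3, e4, List.append_nil, pvInterAll, foldl_inter_eq]
  · -- middle
    have hkpos : 0 < k := by
      rcases Nat.eq_zero_or_pos k with h | h
      · exact absurd (by exact_mod_cast congrArg (Nat.cast : Nat → Int) h) hi0
      · exact h
    have hkub : k < ss.length + 1 := by
      have hne : k ≠ ss.length + 1 := by
        intro h
        apply hilast
        rw [hlen, h]
        push_cast
        ring
      omega
    obtain ⟨j, rfl⟩ : ∃ j, k = j + 1 := ⟨k - 1, by omega⟩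
    have e5 : ((j + 1 : Nat) : Int) - 1 = ((j : Nat) : Int) := by push_cast; ring
    rw [e5, PySem.List.pyGetD_natCast, PySem.List.pyGetD_natCast, pvPrefInters]
    rw [List.getD_eq_getElem _ _ (show j < (pvPrefGo s0 (s1 :: ss)).length by omega)]
    rw [pvPrefGo_getElem _ _ _ (by simp; omega) (by omega)]
    rw [List.getD_eq_getElem _ _ (show j + 1 + 1 < (pvSufInters (s0 :: s1 :: ss)).length by omega)]
    rw [pvSufInters_getElem _ _ (by simp; omega) (by omega)]
    rw [inter_pvNF]
    have hidx : j + 1 + 1 < (s0 :: s1 :: ss).length := by simp; omega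
    have e8 := List.drop_eq_getElem_cons (l := s0 :: s1 :: ss) (i := j + 1 + 1) hidx
    rw [show List.take (j + 1) (s0 :: s1 :: ss) = s0 :: List.take j (s1 :: ss) from
      List.take_succ_cons, List.cons_append, pvInterAll, foldl_inter_eq, e8,
      List.getD_eq_getElem _ _ hidx]

theorem common_eq (s0 s1 : List String) (ss : List (List String)) :
    pvInterAll (s0 :: s1 :: ss)
      = PySem.List.pyGetD (pvPrefInters (s0 :: s1 :: ss)) (-1) [] := by
  have hpreflen : (pvPrefGo s0 (s1 :: ss)).length = ss.length + 2 := by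
    rw [length_pvPrefGo]; simp
  have hne : pvPrefGo s0 (s1 :: ss) ≠ [] := by
    intro h
    rw [h] at hpreflen
    simp at hpreflen
  rw [pvInterAll, foldl_inter_eq, pvPrefInters, PySem.List.pyGetD_neg_one _ _ hne,
    List.getLast_eq_getElem]
  simp only [hpreflen]
  rw [pvPrefGo_getElem _ _ _ (by simp) (by omega), List.take_of_length_le (by simp)]

theorem total_eq (v0 : List String) (t : List (List String)) :
    pvUnionAll (PySem.Set.ofList v0 :: t)
      = (PySem.Set.ofList v0 :: t).foldl PySem.Set.union [] := by
  rw [pvUnionAll, List.foldl_cons]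
  have h : PySem.Set.union ([] : PySem.Set String) (PySem.Set.ofList v0)
      = PySem.Set.ofList (PySem.Set.ofList v0) := rfl
  rw [h, PySem.Set.ofList_eq_self_of_nodup _ (PySem.Set.nodup_ofList _)]

theorem common_eq' (p0 p1 : String × List String) (rest : List (String × List String)) :
    pvInterAll ((p0 :: p1 :: rest).map (fun p => PySem.Set.ofList p.2))
      = PySem.List.pyGetD (pvPrefInters ((p0 :: p1 :: rest).map (fun p => PySem.Set.ofList p.2))) (-1) [] := by
  simp only [List.map_cons]
  exact common_eq _ _ _

theorem total_eq' (p0 p1 : String × List String) (rest : List (String × List String)) :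
    pvUnionAll ((p0 :: p1 :: rest).map (fun p => PySem.Set.ofList p.2))
      = ((p0 :: p1 :: rest).map (fun p => PySem.Set.ofList p.2)).foldl PySem.Set.union [] := by
  simp only [List.map_cons]
  exact total_eq _ _

theorem others_eq' (p0 p1 : String × List String) (rest : List (String × List String)) (i : Int)
    (h0 : 0 ≤ i) (h1 : i < PySem.List.len ((p0 :: p1 :: rest).map (fun p => PySem.Set.ofList p.2))) :
    pvInterAll (PySem.List.slice ((p0 :: p1 :: rest).map (fun p => PySem.Set.ofList p.2)) none (some i) ++
                PySem.List.slice ((p0 :: p1 :: rest).map (fun p => PySem.Set.ofList p.2)) (some (i + 1)) none)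
      = (if i = 0 then
           PySem.List.pyGetD (pvSufInters ((p0 :: p1 :: rest).map (fun p => PySem.Set.ofList p.2))) 1 []
         else if i = PySem.List.len ((p0 :: p1 :: rest).map (fun p => PySem.Set.ofList p.2)) - 1 then
           PySem.List.pyGetD (pvPrefInters ((p0 :: p1 :: rest).map (fun p => PySem.Set.ofList p.2)))
             (PySem.List.len ((p0 :: p1 :: rest).map (fun p => PySem.Set.ofList p.2)) - 2) []
         else PySem.Set.inter
           (PySem.List.pyGetD (pvPrefInters ((p0 :: p1 :: rest).map (fun p => PySem.Set.ofList p.2))) (i - 1) [])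
           (PySem.List.pyGetD (pvSufInters ((p0 :: p1 :: rest).map (fun p => PySem.Set.ofList p.2))) (i + 1) [])) := by
  simp only [List.map_cons] at h1 ⊢
  exact others_eq _ _ _ i h0 h1

theorem analyze_items_spec' : ∀ (friends_items : List (String × List String)),
    2 ≤ friends_items.length →
    analyze_items friends_items = analyze_items_alt friends_items := by
  intro fi hpre
  obtain - | ⟨p0, - | ⟨p1, rest⟩⟩ := fi
  · simp at hpre
  · simp at hpre
  simp only [analyze_items, analyze_items_alt]
  rw [← common_eq', ← total_eq']
  rw [PySem.List.enumerate_eq_map_pyRange _ ([] : List String), List.foldl_map]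
  congr 1
  congr 1
  congr 1
  all_goals
    refine congrArg _ (PySem.List.foldl_congr_mem _ _ _ _ ?_)
    intro acc i hi
    obtain ⟨h0, h1⟩ := PySem.List.mem_pyRange_one.mp hi
    dsimp only
    rw [others_eq' _ _ _ i h0 h1]

-- ===== VERDICT (by name: the statement is the Claim_ definition above) =====
theorem analyze_items_spec : Claim_equal_analyze_items := by
  unfold Claim_equal_analyze_items
  intro fi _ hpre
  unfold Spec_analyze_items
  exact analyze_items_spec' fi hpre.1
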